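-- pv_equiv track=rewrite | github.com/dongxubin87/MIT6.006 | lec3-4/brick_blowing.py | merge_damage
-- ===== SOURCE A (Python) =====
-- def merge_damage(a):
--     n = len(a)
--     res = [1 for _ in a]
--     H = [(a[i], i) for i in range(len(a))]
--
--     def merge_count(H, l, r):
--         if r - l <= 1:
--             return
--         mid = (l + r) // 2
--         merge_count(H, l, mid)
--         merge_count(H, mid, r)
--         i = l
--         j = mid
--         temp = []
--         count = 0
--         while i < mid and j < r:
--             if H[i][0] > H[j][0]:
--                 temp.append(H[j])
--                 count += 1
--                 j += 1
--             else:
--                 temp.append(H[i])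
--                 res[H[i][1]] += count
--                 i += 1
--         while i < mid:
--             temp.append(H[i])
--             res[H[i][1]] += count
--             i += 1
--         while j < r:
--             temp.append(H[j])
--             j += 1
--
--         H[l:r] = temp
--
--     merge_count(H, 0, n)
--     return res
-- ===== SOURCE B (Python) =====
-- def merge_damage(a):
--     res = []
--     for i in range(len(a)):
--         c = 1
--         for x in a[i + 1:]:
--             if x < a[i]:
--                 c += 1
--         res.append(c)
--     return res
-- ===== Notes on version B (the rewrite author's own statement) =====
-- stated objective: simpler
-- what changed: Replaced the merge-sort inversion counter (mutating an enumerated copy and a shared res array inside a recursive merge) by a direct nested loop that, for each index, counts strictly smaller elements to its right.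
import Mathlib
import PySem

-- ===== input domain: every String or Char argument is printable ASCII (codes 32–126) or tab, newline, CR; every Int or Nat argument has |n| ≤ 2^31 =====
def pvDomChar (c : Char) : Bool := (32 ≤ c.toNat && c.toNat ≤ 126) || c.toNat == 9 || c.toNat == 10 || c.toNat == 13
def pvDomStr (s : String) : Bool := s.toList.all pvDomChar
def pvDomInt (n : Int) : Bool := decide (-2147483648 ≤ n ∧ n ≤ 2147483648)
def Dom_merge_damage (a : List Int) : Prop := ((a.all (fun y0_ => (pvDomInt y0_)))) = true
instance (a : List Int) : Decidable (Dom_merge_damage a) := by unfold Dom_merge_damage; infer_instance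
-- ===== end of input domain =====

-- B replaces the merge-sort inversion counter by a plain nested loop counting, for each
-- index, the strictly smaller elements to its right; simpler, not faster.

-- ===== PORT A =====
-- res[k] += c at index k (no-op when k out of range, which never happens here)
def pvUpd (res : List Int) (k : Nat) (c : Int) : List Int :=
  res.set k (res.getD k 0 + c)

-- the three while-loops of merge_count, as one recursion over the two runs
def pvMergeLoop (res : List Int) (L R : List (Int × Nat)) (count : Int) :
    List (Int × Nat) × List Int :=
  match L, R with
  | x :: L', y :: R' =>
    if x.1 > y.1 then
      let p := pvMergeLoop res (x :: L') R' (count + 1)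
      (y :: p.1, p.2)
    else
      let p := pvMergeLoop (pvUpd res x.2 count) L' (y :: R') count
      (x :: p.1, p.2)
  | x :: L', [] =>
    let p := pvMergeLoop (pvUpd res x.2 count) L' [] count
    (x :: p.1, p.2)
  | [], r => (r, res)
termination_by L.length + R.length

-- merge_count on the segment H[l:r): the segment is passed as a list; (l+r)//2 - l = len/2
def pvMergeCount (H : List (Int × Nat)) (res : List Int) : List (Int × Nat) × List Int :=
  if _h : H.length ≤ 1 then (H, res)
  else
    let mid := H.length / 2
    let p1 := pvMergeCount (H.take mid) res
    let p2 := pvMergeCount (H.drop mid) p1.2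
    pvMergeLoop p2.2 p1.1 p2.1 0
termination_by H.length
decreasing_by
  · simp only [List.length_take]; omega
  · simp only [List.length_drop]; omega

-- [(a[i], i) for i in range(len(a))]
def pvEnum : List Int → Nat → List (Int × Nat)
  | [], _ => []
  | x :: t, i => (x, i) :: pvEnum t (i + 1)

def merge_damage (a : List Int) : List Int :=
  (pvMergeCount (pvEnum a 0) (List.replicate a.length 1)).2

-- ===== PORT B =====
def merge_damage_alt (a : List Int) : List Int :=
  (List.range a.length).foldl
    (fun res i =>
      res ++ [(a.drop (i + 1)).foldl (fun c x => if x < a.getD i 0 then c + 1 else c) 1])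
    []

-- ===== PRECONDITION & SPEC =====
def Spec_merge_damage (a : List Int) (out : List Int) : Prop := out = merge_damage_alt a
instance (a : List Int) (out : List Int) : Decidable (Spec_merge_damage a out) := by unfold Spec_merge_damage; infer_instance

-- ===== CLAIM (what is proved, stated in full; the proofs are below) =====
def Claim_equal_merge_damage : Prop := ∀ (a : List Int), Dom_merge_damage a → Spec_merge_damage a (merge_damage a)

-- ===== LEMMAS AND PROOFS =====

-- the common closed form: entry k is 1 + #(strictly smaller elements to the right of k)
def pvGold (a : List Int) : List Int :=
  (List.range a.length).map
    (fun k => 1 + ((a.drop (k + 1)).countP (fun y => decide (y < a.getD k 0)) : Int))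

-- #(y in R with y.1 < v), as an Int
def pvCnt (R : List (Int × Nat)) (v : Int) : Int :=
  (R.countP (fun y => decide (y.1 < v)) : Int)

-- total credit added to index k when merging runs L (left) and R (right), start count c
def pvCross (L R : List (Int × Nat)) (k : Nat) (c : Int) : Int :=
  (L.map (fun x => if x.2 = k then c + pvCnt R x.1 else 0)).sum

-- inversions of H credited to index k
def pvInv : List (Int × Nat) → Nat → Int
  | [], _ => 0
  | x :: t, k => (if x.2 = k then pvCnt t x.1 else 0) + pvInv t k

def pvLe (u v : Int × Nat) : Prop := u.1 ≤ v.1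

theorem pvUpd_length (res : List Int) (k : Nat) (c : Int) :
    (pvUpd res k c).length = res.length := by
  simp [pvUpd]

theorem getD_pvUpd (res : List Int) (j : Nat) (c : Int) (k : Nat) (hj : j < res.length) :
    (pvUpd res j c).getD k 0 = res.getD k 0 + (if j = k then c else 0) := by
  simp only [pvUpd, List.getD, List.getElem?_set]
  by_cases h : j = k
  · subst h
    simp [hj, List.getElem?_eq_getElem hj]
  · simp [h]

theorem pvCnt_cons (y : Int × Nat) (R : List (Int × Nat)) (v : Int) :
    pvCnt (y :: R) v = pvCnt R v + (if y.1 < v then 1 else 0) := by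
  simp only [pvCnt, List.countP_cons]
  by_cases h : y.1 < v <;> simp [h]

theorem pvCnt_append (R S : List (Int × Nat)) (v : Int) :
    pvCnt (R ++ S) v = pvCnt R v + pvCnt S v := by
  simp [pvCnt, List.countP_append]

theorem pvCnt_perm {R R' : List (Int × Nat)} (h : R.Perm R') (v : Int) :
    pvCnt R v = pvCnt R' v := by
  simp [pvCnt, h.countP_eq]

theorem pvCross_perm {L L' R R' : List (Int × Nat)} (hL : L.Perm L') (hR : R.Perm R')
    (k : Nat) (c : Int) : pvCross L R k c = pvCross L' R' k c := by
  unfold pvCross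
  have hmap : ∀ M : List (Int × Nat),
      M.map (fun x => if x.2 = k then c + pvCnt R x.1 else 0)
        = M.map (fun x => if x.2 = k then c + pvCnt R' x.1 else 0) := by
    intro M; apply List.map_congr_left; intro x _; rw [pvCnt_perm hR]
  rw [hmap, List.Perm.sum_eq (hL.map _)]

-- the merge loop: result list is a permutation of L ++ R
theorem pvMergeLoop_perm (res : List Int) (L R : List (Int × Nat)) (c : Int) :
    (pvMergeLoop res L R c).1.Perm (L ++ R) := by
  fun_induction pvMergeLoop with
  | case1 res c x L' y R' hgt p ih =>
    exact ((ih.cons y).trans List.perm_middle.symm).symm.symm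
  | case2 res c x L' y R' hgt p ih =>
    exact ih.cons x
  | case3 res c x L' p ih =>
    exact ih.cons x
  | case4 res c r =>
    simp

theorem pvMergeLoop_sorted (res : List Int) (L R : List (Int × Nat)) (c : Int) :
    L.Pairwise pvLe → R.Pairwise pvLe → (pvMergeLoop res L R c).1.Pairwise pvLe := by
  fun_induction pvMergeLoop with
  | case1 res c x L' y R' hgt p ih =>
    intro hL hR
    have hR' := (List.pairwise_cons.mp hR).2
    show ((y :: (pvMergeLoop res (x :: L') R' (c + 1)).1).Pairwise pvLe)
    refine List.Pairwise.cons ?_ (ih hL hR')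
    intro z hz
    have hz' : z ∈ (x :: L') ++ R' := (pvMergeLoop_perm res (x :: L') R' (c + 1)).subset hz
    rcases List.mem_append.mp hz' with h | h
    · rcases List.mem_cons.mp h with h | h
      · subst h; exact le_of_lt hgt
      · exact le_trans (le_of_lt hgt) ((List.pairwise_cons.mp hL).1 z h)
    · exact (List.pairwise_cons.mp hR).1 z h
  | case2 res c x L' y R' hgt p ih =>
    intro hL hR
    have hL' := (List.pairwise_cons.mp hL).2
    show ((x :: (pvMergeLoop (pvUpd res x.2 c) L' (y :: R') c).1).Pairwise pvLe)
    refine List.Pairwise.cons ?_ (ih hL' hR)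
    intro z hz
    have hz' : z ∈ L' ++ (y :: R') := (pvMergeLoop_perm _ L' (y :: R') c).subset hz
    rcases List.mem_append.mp hz' with h | h
    · exact (List.pairwise_cons.mp hL).1 z h
    · have hxy : x.1 ≤ y.1 := le_of_not_gt hgt
      rcases List.mem_cons.mp h with h | h
      · subst h; exact hxy
      · exact le_trans hxy ((List.pairwise_cons.mp hR).1 z h)
  | case3 res c x L' p ih =>
    intro hL hR
    have hL' := (List.pairwise_cons.mp hL).2
    show ((x :: (pvMergeLoop (pvUpd res x.2 c) L' [] c).1).Pairwise pvLe)
    refine List.Pairwise.cons ?_ (ih hL' (List.Pairwise.nil))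
    intro z hz
    have hz' : z ∈ L' ++ ([] : List (Int × Nat)) := (pvMergeLoop_perm _ L' [] c).subset hz
    simp only [List.append_nil] at hz'
    exact (List.pairwise_cons.mp hL).1 z hz'
  | case4 res c r =>
    intro _ hR
    exact hR

theorem pvMergeLoop_len (res : List Int) (L R : List (Int × Nat)) (c : Int) :
    (pvMergeLoop res L R c).2.length = res.length := by
  fun_induction pvMergeLoop with
  | case1 res c x L' y R' hgt p ih => exact ih
  | case2 res c x L' y R' hgt p ih =>
    show (pvMergeLoop (pvUpd res x.2 c) L' (y :: R') c).2.length = res.length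
    rw [ih, pvUpd_length]
  | case3 res c x L' p ih =>
    show (pvMergeLoop (pvUpd res x.2 c) L' [] c).2.length = res.length
    rw [ih, pvUpd_length]
  | case4 res c r => rfl

-- the merge loop: the credit added to each res entry
theorem pvMergeLoop_getD (res : List Int) (L R : List (Int × Nat)) (c : Int) (k : Nat) :
    L.Pairwise pvLe → R.Pairwise pvLe → (∀ x ∈ L, x.2 < res.length) →
    (pvMergeLoop res L R c).2.getD k 0 = res.getD k 0 + pvCross L R k c := by
  fun_induction pvMergeLoop with
  | case1 res c x L' y R' hgt p ih =>
    intro hL hR hidx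
    have hR' := (List.pairwise_cons.mp hR).2
    show (pvMergeLoop res (x :: L') R' (c + 1)).2.getD k 0 = _
    rw [ih hL hR' hidx]
    congr 1
    unfold pvCross
    congr 1
    apply List.map_congr_left
    intro z hz
    have hzx : x.1 ≤ z.1 := by
      rcases List.mem_cons.mp hz with h | h
      · subst h; exact le_refl _
      · exact (List.pairwise_cons.mp hL).1 z h
    have hyz : y.1 < z.1 := lt_of_lt_of_le hgt hzx
    rw [pvCnt_cons, if_pos hyz]
    by_cases h : z.2 = k
    · simp only [h, if_pos rfl]; ring
    · simp [h]
  | case2 res c x L' y R' hgt p ih =>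
    intro hL hR hidx
    have hL' := (List.pairwise_cons.mp hL).2
    have hidx' : ∀ z ∈ L', z.2 < (pvUpd res x.2 c).length := by
      intro z hz; rw [pvUpd_length]; exact hidx z (List.mem_cons_of_mem _ hz)
    show (pvMergeLoop (pvUpd res x.2 c) L' (y :: R') c).2.getD k 0 = _
    rw [ih hL' hR hidx', getD_pvUpd res x.2 c k (hidx x List.mem_cons_self)]
    have hcnt : pvCnt (y :: R') x.1 = 0 := by
      have hxy : x.1 ≤ y.1 := le_of_not_gt hgt
      have hno : ∀ z ∈ y :: R', ¬ z.1 < x.1 := by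
        intro z hz
        rcases List.mem_cons.mp hz with h | h
        · subst h; omega
        · have := (List.pairwise_cons.mp hR).1 z h; simp only [pvLe] at this; omega
      simp only [pvCnt]
      rw [List.countP_eq_zero.mpr (by intro z hz; simpa using hno z hz)]
      rfl
    unfold pvCross
    simp only [List.map_cons, List.sum_cons, hcnt]
    by_cases h : x.2 = k
    · simp only [h, if_pos rfl]; ring
    · simp only [h, if_neg h]; ring
  | case3 res c x L' p ih =>
    intro hL _ hidx
    have hL' := (List.pairwise_cons.mp hL).2
    have hidx' : ∀ z ∈ L', z.2 < (pvUpd res x.2 c).length := by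
      intro z hz; rw [pvUpd_length]; exact hidx z (List.mem_cons_of_mem _ hz)
    show (pvMergeLoop (pvUpd res x.2 c) L' [] c).2.getD k 0 = _
    rw [ih hL' List.Pairwise.nil hidx', getD_pvUpd res x.2 c k (hidx x List.mem_cons_self)]
    have hcnt : pvCnt ([] : List (Int × Nat)) x.1 = 0 := by simp [pvCnt]
    unfold pvCross
    simp only [List.map_cons, List.sum_cons, hcnt]
    by_cases h : x.2 = k
    · simp only [h, if_pos rfl]; ring
    · simp only [h, if_neg h]; ring
  | case4 res c r =>
    intro _ _ _
    simp [pvCross]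

-- inversions split across a concatenation
theorem pvInv_append (L R : List (Int × Nat)) (k : Nat) :
    pvInv (L ++ R) k = pvInv L k + pvInv R k + pvCross L R k 0 := by
  induction L with
  | nil => simp [pvInv, pvCross]
  | cons x L' ih =>
    simp only [List.cons_append, pvInv, ih, pvCnt_append, pvCross, List.map_cons,
      List.sum_cons]
    by_cases h : x.2 = k
    · subst h; simp; ring
    · simp only [if_neg h]; ring

-- the recursive counter: full characterisation
theorem pvMergeCount_spec (H : List (Int × Nat)) (res : List Int) :
    (∀ x ∈ H, x.2 < res.length) →
    (pvMergeCount H res).1.Perm H ∧ (pvMergeCount H res).1.Pairwise pvLe ∧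
    (pvMergeCount H res).2.length = res.length ∧
    ∀ k, (pvMergeCount H res).2.getD k 0 = res.getD k 0 + pvInv H k := by
  fun_induction pvMergeCount with
  | case1 H res h =>
    intro _
    refine ⟨List.Perm.refl _, ?_, rfl, ?_⟩
    · match H, h with
      | [], _ => simp
      | [x], _ => simp
    · intro k
      match H, h with
      | [], _ => simp [pvInv]
      | [x], _ => by_cases hk : x.2 = k <;> simp [pvInv, pvCnt, hk]
  | case2 H res h mid p1 p2 ihA ihB ihC =>
    intro hidx
    have hidxT : ∀ x ∈ H.take (H.length / 2), x.2 < res.length :=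
      fun x hx => hidx x (List.mem_of_mem_take hx)
    obtain ⟨p1perm, p1sorted, p1len, p1pt⟩ := ihA hidxT
    have hidxD : ∀ x ∈ H.drop (H.length / 2),
        x.2 < (pvMergeCount (H.take (H.length / 2)) res).2.length := by
      intro x hx; rw [p1len]; exact hidx x (List.mem_of_mem_drop hx)
    obtain ⟨p2perm, p2sorted, p2len, p2pt⟩ := ihC hidxD
    have hidxL : ∀ x ∈ (pvMergeCount (H.take (H.length / 2)) res).1,
        x.2 < (pvMergeCount (H.drop (H.length / 2))
          (pvMergeCount (H.take (H.length / 2)) res).2).2.length := by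
      intro x hx
      rw [p2len, p1len]
      exact hidx x (List.mem_of_mem_take (p1perm.subset hx))
    refine ⟨?_, ?_, ?_, ?_⟩
    · exact (pvMergeLoop_perm _ _ _ 0).trans
        ((p1perm.append p2perm).trans (by rw [List.take_append_drop]))
    · exact pvMergeLoop_sorted _ _ _ 0 p1sorted p2sorted
    · show (pvMergeLoop (pvMergeCount (H.drop (H.length / 2))
          (pvMergeCount (H.take (H.length / 2)) res).2).2
          (pvMergeCount (H.take (H.length / 2)) res).1
          (pvMergeCount (H.drop (H.length / 2))
            (pvMergeCount (H.take (H.length / 2)) res).2).1 0).2.length = res.length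
      rw [pvMergeLoop_len, p2len, p1len]
    · intro k
      show (pvMergeLoop (pvMergeCount (H.drop (H.length / 2))
          (pvMergeCount (H.take (H.length / 2)) res).2).2
          (pvMergeCount (H.take (H.length / 2)) res).1
          (pvMergeCount (H.drop (H.length / 2))
            (pvMergeCount (H.take (H.length / 2)) res).2).1 0).2.getD k 0 = _
      rw [pvMergeLoop_getD _ _ _ 0 k p1sorted p2sorted hidxL, p2pt, p1pt]
      have hsplit := pvInv_append (H.take (H.length / 2)) (H.drop (H.length / 2)) k
      rw [List.take_append_drop] at hsplit
      rw [pvCross_perm p1perm p2perm k 0, hsplit]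
      ring

-- enumeration: indices lie in [i, i + length)
theorem pvEnum_idx (a : List Int) (i : Nat) :
    ∀ x ∈ pvEnum a i, i ≤ x.2 ∧ x.2 < i + a.length := by
  induction a generalizing i with
  | nil => simp [pvEnum]
  | cons h t ih =>
    intro x hx
    rcases List.mem_cons.mp hx with hx | hx
    · subst hx; simp
    · have := ih (i + 1) x hx
      simp only [List.length_cons]
      omega

theorem pvCnt_enum (t : List Int) (j : Nat) (v : Int) :
    pvCnt (pvEnum t j) v = (t.countP (fun y => decide (y < v)) : Int) := by
  induction t generalizing j with
  | nil => simp [pvEnum, pvCnt]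
  | cons h t ih =>
    simp only [pvEnum, pvCnt, List.countP_cons] at *
    by_cases hv : h < v <;> simp [hv, ← ih (j + 1), pvCnt]

-- inversions of the enumeration, in closed form
theorem pvInv_enum (a : List Int) (i k : Nat) :
    pvInv (pvEnum a i) k =
      if i ≤ k ∧ k < i + a.length then
        ((a.drop (k - i + 1)).countP (fun y => decide (y < a.getD (k - i) 0)) : Int)
      else 0 := by
  induction a generalizing i with
  | nil => simp [pvEnum, pvInv]
  | cons h t ih =>
    simp only [pvEnum, pvInv]
    by_cases hik : i = k
    · subst hik
      have h2 : pvInv (pvEnum t (i + 1)) i = 0 := by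
        rw [ih (i + 1), if_neg (by omega)]
      rw [h2, pvCnt_enum]
      have hc : i ≤ i ∧ i < i + (h :: t).length := ⟨le_refl _, by simp⟩
      rw [if_pos hc]
      simp
    · rw [if_neg hik, ih (i + 1)]
      by_cases hcond : i + 1 ≤ k ∧ k < i + 1 + t.length
      · rw [if_pos hcond, if_pos (by simp only [List.length_cons]; omega)]
        have hk1 : k - i = (k - (i + 1)) + 1 := by omega
        rw [hk1]
        simp only [List.drop_succ_cons, List.getD_cons_succ, zero_add]
      · rw [if_neg hcond, if_neg (by simp only [List.length_cons]; omega)]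
        simp

-- ===== B-side lemmas =====
theorem foldl_count (v : Int) (l : List Int) (c : Int) :
    l.foldl (fun c x => if x < v then c + 1 else c) c
      = c + (l.countP (fun y => decide (y < v)) : Int) := by
  induction l generalizing c with
  | nil => simp
  | cons h t ih =>
    simp only [List.foldl_cons, List.countP_cons]
    by_cases hv : h < v
    · rw [if_pos hv, ih]; simp [hv]; ring
    · rw [if_neg hv, ih]; simp [hv]

theorem foldl_append_map {α β : Type} (f : α → β) (l : List α) (acc : List β) :
    l.foldl (fun r i => r ++ [f i]) acc = acc ++ l.map f := by
  induction l generalizing acc with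
  | nil => simp
  | cons h t ih => simp [ih]

theorem alt_eq_gold (a : List Int) : merge_damage_alt a = pvGold a := by
  unfold merge_damage_alt pvGold
  rw [foldl_append_map]
  simp only [List.nil_append]
  apply List.map_congr_left
  intro i _
  rw [foldl_count]

theorem a_eq_gold (a : List Int) : merge_damage a = pvGold a := by
  unfold merge_damage
  have hidx : ∀ x ∈ pvEnum a 0, x.2 < (List.replicate a.length (1 : Int)).length := by
    intro x hx
    rw [List.length_replicate]
    have := pvEnum_idx a 0 x hx
    omega
  obtain ⟨_, _, hlen, hpt⟩ := pvMergeCount_spec (pvEnum a 0) (List.replicate a.length 1) hidx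
  have hglen : (pvGold a).length = a.length := by simp [pvGold]
  apply List.ext_getElem
  · rw [hlen, List.length_replicate, hglen]
  · intro k hk1 hk2
    have hk : k < a.length := by rwa [hlen, List.length_replicate] at hk1
    have hA : (pvMergeCount (pvEnum a 0) (List.replicate a.length 1)).2.getD k 0
        = (pvMergeCount (pvEnum a 0) (List.replicate a.length 1)).2[k]'hk1 := by
      rw [List.getD_eq_getElem?_getD, List.getElem?_eq_getElem hk1]
      rfl
    rw [← hA, hpt k, pvInv_enum a 0 k]
    rw [if_pos (by omega)]
    simp only [Nat.zero_add, Nat.sub_zero]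
    have hrep : (List.replicate a.length (1 : Int)).getD k 0 = 1 := by
      rw [List.getD_eq_getElem?_getD, List.getElem?_replicate]
      simp [hk]
    rw [hrep]
    simp [pvGold, hk]

-- ===== VERDICT (by name: the statement is the Claim_ definition above) =====
theorem merge_damage_spec : Claim_equal_merge_damage := by
  intro a _
  unfold Spec_merge_damage
  rw [a_eq_gold, alt_eq_gold]
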